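-- pv_equiv track=rewrite | github.com/thegeek-sys/uni | ALG2/grafi.py | es4
-- ===== SOURCE A (Python) =====
-- def es4(P, x):
--     D = [x]
--     i=0
--     while len(D)>i:
--         for y in range(len(P)):
--             if P[y] == D[i]:
--                 D.append(y)
--         i+=1
--     return D
--
-- P = [1,2,2,2,3]
-- ===== SOURCE B (Python) =====
-- def es4(P, x):
--     # Level-order (BFS-by-layers) expansion: build a value -> children-indices
--     # adjacency dict in one pass, then repeatedly flat-map the whole frontier
--     # into the next layer, concatenating layers into the output.
--     children = {}
--     for y, p in enumerate(P):
--         children.setdefault(p, []).append(y)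
--     out = []
--     frontier = [x]
--     while frontier:
--         out += frontier
--         frontier = [y for v in frontier for y in children.get(v, [])]
--     return out
-- ===== Notes on version B (the rewrite author's own statement) =====
-- stated objective: alternative
-- what changed: B replaces A's single growing queue scanned by an index pointer (with a full rescan of P per queue element) by level-order expansion: a value->children adjacency dict built once, then whole BFS layers produced by flat-mapping the previous layer and concatenated into the output.
import Mathlib
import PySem

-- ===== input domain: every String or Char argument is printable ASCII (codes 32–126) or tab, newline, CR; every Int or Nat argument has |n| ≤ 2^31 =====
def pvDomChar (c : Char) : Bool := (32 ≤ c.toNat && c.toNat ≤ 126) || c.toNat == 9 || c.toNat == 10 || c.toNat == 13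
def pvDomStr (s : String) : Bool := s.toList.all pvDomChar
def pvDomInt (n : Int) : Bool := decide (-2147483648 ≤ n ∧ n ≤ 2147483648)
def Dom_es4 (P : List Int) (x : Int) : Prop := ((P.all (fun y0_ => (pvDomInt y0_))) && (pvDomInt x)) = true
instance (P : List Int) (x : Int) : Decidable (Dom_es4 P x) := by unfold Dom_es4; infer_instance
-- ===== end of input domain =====

-- B replaces A's single growing queue (scanned by an index pointer, rescanning all of P for
-- each queue element) by level-order expansion: a value->children adjacency dict built in one
-- pass, then whole BFS layers obtained by flat-mapping the previous layer (objective: alternative).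
-- Both Python loops are ported with explicit fuel; on every input admitted by Pre_ (exactly
-- where Python A terminates) the fuel suffices, so the ports are faithful there.

-- ===== PORT A =====
-- inner 'for y in range(len(P)): if P[y] == D[i]: D.append(y)'
def es4InnerStep (P : List Int) (i : Nat) (D : List Int) (y : Int) : List Int :=
  if PySem.List.pyGetD P y 0 == D.getD i 0 then D ++ [y] else D

def es4Loop (P : List Int) : Nat → List Int → Nat → List Int
  | 0, D, _ => D
  | fuel + 1, D, i =>
    if D.length > i then
      es4Loop P fuel ((PySem.List.pyRange 0 (PySem.List.len P) 1).foldl (es4InnerStep P i) D) (i + 1)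
    else D

def es4 (P : List Int) (x : Int) : List Int := es4Loop P (P.length * P.length + 2) [x] 0

-- ===== PORT B =====
-- 'for y, p in enumerate(P): children.setdefault(p, []).append(y)'
-- (setdefault-then-append == children[p] = children.get(p, []) + [y], i.e. Dict.modify)
def buildChildren (P : List Int) : PySem.Dict Int (List Int) :=
  (PySem.List.enumerate P).foldl (fun d q => d.modify q.2 [] (· ++ [q.1])) PySem.Dict.empty

-- 'while frontier: out += frontier; frontier = [y for v in frontier for y in children.get(v, [])]'
def es4AltLoop (ch : PySem.Dict Int (List Int)) : Nat → List Int → List Int → List Int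
  | 0, out, _ => out
  | fuel + 1, out, F =>
    if F = [] then out
    else es4AltLoop ch fuel (out ++ F) (F.flatMap fun v => ch.getD v [])

def es4_alt (P : List Int) (x : Int) : List Int :=
  es4AltLoop (buildChildren P) (P.length + 2) [] [x]

-- ===== PRECONDITION & SPEC =====
-- one parent-pointer step: an in-range index moves to its parent value, anything else is fixed
def pstep (P : List Int) (v : Int) : Int :=
  if 0 ≤ v ∧ v < P.length then P.getD v.toNat 0 else v

-- Pre_ excludes exactly the inputs on which Python A loops forever: those where x is an
-- in-range index lying on a parent-pointer cycle (then x's cycle predecessors are re-enqueued forever).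
def Pre_es4 (P : List Int) (x : Int) : Prop :=
  ¬ (0 ≤ x ∧ x < P.length ∧ ∃ k ∈ List.range P.length, (pstep P)^[k + 1] x = x)
instance (P : List Int) (x : Int) : Decidable (Pre_es4 P x) := by unfold Pre_es4; infer_instance

def pvWitness_es4 : List Int × Int := ([1, 2, 2, 2, 3], 0)

def Spec_es4 (P : List Int) (x : Int) (out : List Int) : Prop := out = es4_alt P x
instance (P : List Int) (x : Int) (out : List Int) : Decidable (Spec_es4 P x out) := by unfold Spec_es4; infer_instance

-- ===== CLAIM (what is proved, stated in full; the proofs are below) =====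
def Claim_equal_es4 : Prop := ∀ (P : List Int) (x : Int), Dom_es4 P x → Pre_es4 P x → Spec_es4 P x (es4 P x)

-- ===== LEMMAS AND PROOFS =====

-- the next BFS layer of a frontier
def nxt (P : List Int) (F : List Int) : List Int := F.flatMap fun v => (buildChildren P).getD v []

-- the adjacency dictionary's entry at v is the list of indices y with P[y] = v, in order
theorem buildChildren_getD (P : List Int) (v : Int) :
    (buildChildren P).getD v [] =
      ((PySem.List.enumerate P).filter (fun q => q.2 == v)).map (·.1) := by
  unfold buildChildren
  have h := List.foldl_map (f := fun (q : Int × Int) => (q.2, q.1))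
    (g := fun (d : PySem.Dict Int (List Int)) (p : Int × Int) => d.modify p.1 [] (· ++ [p.2]))
    (l := PySem.List.enumerate P) (init := PySem.Dict.empty)
  rw [← h, PySem.Dict.getD_foldl_modify_append]
  simp [List.filter_map, Function.comp_def]

-- A's inner for-loop appends exactly the indices whose parent equals D[i]
theorem innerFold (l : List (Int × Int)) :
    ∀ (D : List Int) (i : Nat), i < D.length →
      l.foldl (fun D q => if q.2 == D.getD i 0 then D ++ [q.1] else D) D
        = D ++ (l.filter (fun q => q.2 == D.getD i 0)).map (·.1) := by
  induction l with
  | nil => intro D i h; simp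
  | cons q t ih =>
    intro D i h
    rw [List.foldl_cons]
    by_cases hq : (q.2 == D.getD i 0) = true
    · rw [if_pos hq, ih (D ++ [q.1]) i (by simp; omega)]
      have hst : (D ++ [q.1]).getD i 0 = D.getD i 0 := by
        simp [List.getD_eq_getElem?_getD, List.getElem?_append_left h]
      rw [hst]
      rw [beq_iff_eq] at hq
      simp [List.getD_eq_getElem?_getD, hq]
    · rw [if_neg hq, ih D i h]
      rw [beq_iff_eq] at hq
      simp only [List.getD_eq_getElem?_getD] at hq
      simp [List.getD_eq_getElem?_getD, hq]

theorem innerA (P D : List Int) (i : Nat) (h : i < D.length) :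
    (PySem.List.pyRange 0 (PySem.List.len P) 1).foldl (es4InnerStep P i) D
      = D ++ (buildChildren P).getD (D.getD i 0) [] := by
  have he : PySem.List.enumerate P
      = (PySem.List.pyRange 0 (PySem.List.len P) 1).map (fun j => (j, PySem.List.pyGetD P j 0)) :=
    PySem.List.enumerate_eq_map_pyRange P 0
  have h2 := List.foldl_map (f := fun (j : Int) => (j, PySem.List.pyGetD P j 0))
    (g := fun (D : List Int) (q : Int × Int) => if q.2 == D.getD i 0 then D ++ [q.1] else D)
    (l := PySem.List.pyRange 0 (PySem.List.len P) 1) (init := D)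
  rw [buildChildren_getD, ← innerFold (PySem.List.enumerate P) D i h]
  show (PySem.List.pyRange 0 (PySem.List.len P) 1).foldl
      (fun D j => if PySem.List.pyGetD P j 0 == D.getD i 0 then D ++ [j] else D) D = _
  rw [← h2, ← he]

theorem es4Loop_stop (P : List Int) (fuel : Nat) (D : List Int) (i : Nat) (h : D.length ≤ i) :
    es4Loop P fuel D i = D := by
  cases fuel with
  | zero => rfl
  | succ f => simp [es4Loop, Nat.not_lt.mpr h]

theorem es4AltLoop_nil (ch : PySem.Dict Int (List Int)) (fuel : Nat) (out : List Int) :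
    es4AltLoop ch fuel out [] = out := by
  cases fuel with
  | zero => rfl
  | succ f => simp [es4AltLoop]

theorem getD_append_len (done : List Int) (f : Int) (t : List Int) :
    (done ++ f :: t).getD done.length 0 = f := by
  simp [List.getD_eq_getElem?_getD]

-- processing the |F| queue elements F (with acc already queued behind them) appends nxt P F
theorem chunk (P : List Int) : ∀ (F acc done : List Int) (fuel : Nat),
    es4Loop P (F.length + fuel) (done ++ (F ++ acc)) done.length
      = es4Loop P fuel (done ++ (F ++ (acc ++ nxt P F))) (done.length + F.length) := by
  intro F
  induction F with
  | nil => intro acc done fuel; simp [nxt]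
  | cons f F' ih =>
    intro acc done fuel
    have hlen : (f :: F').length + fuel = (F'.length + fuel) + 1 := by simp; omega
    rw [hlen]
    have hguard : (done ++ (f :: F' ++ acc)).length > done.length := by simp
    rw [es4Loop, if_pos hguard,
        innerA P (done ++ (f :: F' ++ acc)) done.length (by simp)]
    have hget : (done ++ (f :: F' ++ acc)).getD done.length 0 = f := getD_append_len done f (F' ++ acc)
    rw [hget]
    have hstate : (done ++ (f :: F' ++ acc)) ++ (buildChildren P).getD f []
        = (done ++ [f]) ++ (F' ++ (acc ++ (buildChildren P).getD f [])) := by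
      simp
    have hidx : done.length + 1 = (done ++ [f]).length := by simp
    rw [hstate, hidx, ih (acc ++ (buildChildren P).getD f []) (done ++ [f]) fuel]
    have hnxt : nxt P (f :: F') = (buildChildren P).getD f [] ++ nxt P F' := by
      simp [nxt]
    rw [hnxt]
    have hl : (done ++ [f]) ++ (F' ++ ((acc ++ (buildChildren P).getD f []) ++ nxt P F'))
        = done ++ (f :: F' ++ (acc ++ ((buildChildren P).getD f [] ++ nxt P F'))) := by simp
    have hn : (done ++ [f]).length + F'.length = done.length + (f :: F').length := by simp; omega
    rw [hl, hn]

-- the layered loop simulates the queue loop, given enough fuel on both sides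
theorem sim2 (P : List Int) : ∀ (K : Nat) (F out : List Int) (fuelA fuelB : Nat),
    (nxt P)^[K] F = [] →
    (∑ k ∈ Finset.range K, ((nxt P)^[k] F).length) ≤ fuelA →
    K ≤ fuelB →
    es4Loop P fuelA (out ++ F) out.length = es4AltLoop (buildChildren P) fuelB out F := by
  intro K
  induction K with
  | zero =>
    intro F out fuelA fuelB hK _ _
    simp only [Function.iterate_zero, id] at hK
    subst hK
    rw [es4Loop_stop P fuelA (out ++ []) out.length (by simp), es4AltLoop_nil]
    simp
  | succ K ih =>
    intro F out fuelA fuelB hK hA hB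
    by_cases hF : F = []
    · subst hF
      rw [es4Loop_stop P fuelA (out ++ []) out.length (by simp), es4AltLoop_nil]
      simp
    · obtain ⟨fb, rfl⟩ : ∃ fb, fuelB = fb + 1 := ⟨fuelB - 1, by omega⟩
      rw [es4AltLoop, if_neg hF]
      have hsum : F.length + (∑ k ∈ Finset.range K, ((nxt P)^[k] (nxt P F)).length) ≤ fuelA := by
        have h0 : (∑ k ∈ Finset.range (K + 1), ((nxt P)^[k] F).length)
            = (∑ k ∈ Finset.range K, ((nxt P)^[k] (nxt P F)).length) + F.length := by
          rw [Finset.sum_range_succ' (fun k => ((nxt P)^[k] F).length) K]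
          simp [Function.iterate_succ_apply]
        rw [h0] at hA
        omega
      obtain ⟨fuel', rfl⟩ : ∃ f', fuelA = F.length + f' := ⟨fuelA - F.length, by omega⟩
      have hch := chunk P F [] out fuel'
      simp only [List.append_nil, List.nil_append] at hch
      rw [hch]
      have hstate : out ++ (F ++ nxt P F) = (out ++ F) ++ nxt P F := by simp
      have hidx : out.length + F.length = (out ++ F).length := by simp
      rw [hstate, hidx]
      have hflat : (F.flatMap fun v => (buildChildren P).getD v []) = nxt P F := rfl
      rw [hflat]
      exact ih (nxt P F) (out ++ F) fuel' fb
        (by rw [← Function.iterate_succ_apply]; exact hK)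
        (by omega) (by omega)

-- membership in a children list gives range bounds and the parent-step equation
theorem ch_mem (P : List Int) (v y : Int) (h : y ∈ (buildChildren P).getD v []) :
    0 ≤ y ∧ y < (P.length : Int) ∧ pstep P y = v := by
  rw [buildChildren_getD] at h
  simp only [List.mem_map, List.mem_filter] at h
  obtain ⟨q, ⟨hqmem, hqv⟩, hqy⟩ := h
  rw [PySem.List.mem_enumerate_iff] at hqmem
  obtain ⟨k, hk, rfl⟩ := hqmem
  simp only [zero_add] at hqy hqv
  rw [beq_iff_eq] at hqv
  subst hqy
  refine ⟨Int.natCast_nonneg k, by exact_mod_cast hk, ?_⟩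
  unfold pstep
  rw [if_pos ⟨Int.natCast_nonneg k, by exact_mod_cast hk⟩, Int.toNat_natCast, ← hqv]
  simp [List.getD_eq_getElem?_getD, List.getElem?_eq_getElem hk]

-- each children list is duplicate-free (indices come from a sublist of enumerate)
theorem ch_nodup (P : List Int) (v : Int) : ((buildChildren P).getD v []).Nodup := by
  rw [buildChildren_getD]
  have hsub : (((PySem.List.enumerate P).filter (fun q => q.2 == v)).map (·.1)).Sublist
      ((PySem.List.enumerate P).map (·.1)) := ((PySem.List.enumerate P).filter_sublist).map _
  refine hsub.nodup ?_
  rw [PySem.List.map_fst_enumerate]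
  exact PySem.List.nodup_pyRange_one 0 _

theorem nxt_nodup (P : List Int) (F : List Int) (h : F.Nodup) : (nxt P F).Nodup := by
  induction F with
  | nil => simp [nxt]
  | cons f F' ih =>
    have hnf : nxt P (f :: F') = (buildChildren P).getD f [] ++ nxt P F' := by simp [nxt]
    rw [hnf, List.nodup_append]
    rcases List.nodup_cons.mp h with ⟨hfn, hF'⟩
    refine ⟨ch_nodup P f, ih hF', ?_⟩
    intro y hy1 z hz hEq
    subst hEq
    obtain ⟨v, hv, hyv⟩ := List.mem_flatMap.mp hz
    have e1 := (ch_mem P f y hy1).2.2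
    have e2 := (ch_mem P v y hyv).2.2
    have hfv : f = v := e1.symm.trans e2
    exact hfn (hfv ▸ hv)

theorem layer_nodup (P : List Int) (x : Int) : ∀ k, ((nxt P)^[k] [x]).Nodup := by
  intro k
  induction k with
  | zero => simp
  | succ k ih => rw [Function.iterate_succ_apply']; exact nxt_nodup P _ ih

-- layer k+1 members: all parent-chain iterates up to k are in-range, and chain reaches x
theorem layer_chain (P : List Int) (x : Int) : ∀ (k : Nat) (y : Int),
    y ∈ (nxt P)^[k + 1] [x] →
      (∀ j ≤ k, 0 ≤ (pstep P)^[j] y ∧ (pstep P)^[j] y < (P.length : Int)) ∧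
      (pstep P)^[k + 1] y = x := by
  intro k
  induction k with
  | zero =>
    intro y hy
    rw [show (0 : Nat) + 1 = 1 from rfl, Function.iterate_one] at hy
    obtain ⟨v, hv, hyv⟩ := List.mem_flatMap.mp hy
    rcases List.mem_singleton.mp hv with rfl
    obtain ⟨h1, h2, h3⟩ := ch_mem P v y hyv
    exact ⟨fun j hj => by interval_cases j; simpa using ⟨h1, h2⟩, by simpa using h3⟩
  | succ k ih =>
    intro y hy
    rw [Function.iterate_succ_apply'] at hy
    obtain ⟨v, hv, hyv⟩ := List.mem_flatMap.mp hy
    obtain ⟨h1, h2, h3⟩ := ch_mem P v y hyv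
    obtain ⟨ihb, ihx⟩ := ih v hv
    constructor
    · intro j hj
      cases j with
      | zero => simpa using ⟨h1, h2⟩
      | succ j =>
        rw [Function.iterate_succ_apply, h3]
        exact ihb j (by omega)
    · rw [Function.iterate_succ_apply, h3]
      exact ihx

theorem len_le_of_nodup_range (l : List Int) (n : Nat) (hnd : l.Nodup)
    (hmem : ∀ y ∈ l, 0 ≤ y ∧ y < (n : Int)) : l.length ≤ n := by
  classical
  have hcard : l.toFinset.card = l.length := List.toFinset_card_of_nodup hnd
  have hsub : l.toFinset ⊆ Finset.Ico (0 : Int) n := by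
    intro y hy
    rw [List.mem_toFinset] at hy
    rw [Finset.mem_Ico]
    exact hmem y hy
  have := Finset.card_le_card hsub
  rw [hcard] at this
  simpa using this

theorem layer_len (P : List Int) (x : Int) (k : Nat) :
    ((nxt P)^[k + 1] [x]).length ≤ P.length := by
  refine len_le_of_nodup_range _ _ (layer_nodup P x (k + 1)) ?_
  intro y hy
  have h := (layer_chain P x k y hy).1 0 (Nat.zero_le k)
  simpa using h

theorem iterate_period {α : Type} (f : α → α) (v : α) (p : Nat) (h : f^[p] v = v) :
    ∀ (t a : Nat), f^[a + p * t] v = f^[a] v := by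
  intro t
  induction t with
  | zero => simp
  | succ t ih =>
    intro a
    have he : a + p * (t + 1) = (a + p * t) + p := by ring
    rw [he, Function.iterate_add_apply, h, ih a]

-- a duplicate on y's in-range parent chain puts x on an in-range cycle
theorem cycle_from_dup (P : List Int) (x y : Int) (j1 j2 : Nat)
    (hlt : j1 < j2) (hj2 : j2 ≤ P.length)
    (heq : (pstep P)^[j1] y = (pstep P)^[j2] y)
    (hx : (pstep P)^[P.length + 1] y = x)
    (hbnd : ∀ j ≤ P.length, 0 ≤ (pstep P)^[j] y ∧ (pstep P)^[j] y < (P.length : Int)) :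
    0 ≤ x ∧ x < (P.length : Int) ∧ ∃ k ∈ List.range P.length, (pstep P)^[k + 1] x = x := by
  set n := P.length with hn
  set p := j2 - j1 with hp
  have hp0 : 0 < p := by omega
  set v := (pstep P)^[j1] y with hv
  have hper : (pstep P)^[p] v = v := by
    have : (pstep P)^[p + j1] y = (pstep P)^[j2] y := by
      congr 1; omega
    rw [Function.iterate_add_apply] at this
    rw [hv, this, ← heq]
  set q := n + 1 - j1 with hq
  have hxq : (pstep P)^[q] v = x := by
    have : (pstep P)^[q + j1] y = (pstep P)^[n + 1] y := by congr 1; omega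
    rw [Function.iterate_add_apply] at this
    rw [hv, this, hx]
  set r := q % p with hr
  have hrp : r < p := Nat.mod_lt _ hp0
  have hxr : (pstep P)^[r] v = x := by
    rw [← hxq]
    have hdecomp : q = r + p * (q / p) := by
      rw [hr, Nat.add_comm]; exact (Nat.div_add_mod q p).symm
    rw [hdecomp, iterate_period (pstep P) v p hper]
  have hxrange : 0 ≤ x ∧ x < (n : Int) := by
    have : (pstep P)^[r + j1] y = x := by
      rw [Function.iterate_add_apply]; rw [← hv]; exact hxr
    rw [← this]
    exact hbnd (r + j1) (by omega)
  have hxcycle : (pstep P)^[p] x = x := by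
    rw [← hxr, ← Function.iterate_add_apply]
    have : p + r = r + p := by omega
    rw [this, Function.iterate_add_apply, hper, hxr]
  have hn1 : 1 ≤ n := by
    have := hbnd 0 (Nat.zero_le n)
    simp at this
    omega
  refine ⟨hxrange.1, hxrange.2, ⟨p - 1, ?_, ?_⟩⟩
  · rw [List.mem_range]; omega
  · have : p - 1 + 1 = p := by omega
    rw [this]; exact hxcycle

-- under Pre_, the (len P + 1)-st layer is empty
theorem deep_empty (P : List Int) (x : Int) (hpre : Pre_es4 P x) :
    (nxt P)^[P.length + 1] [x] = [] := by
  by_contra h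
  obtain ⟨y, hy⟩ := List.exists_mem_of_ne_nil _ h
  obtain ⟨hbnd, hx⟩ := layer_chain P x P.length y hy
  set n := P.length with hn
  have hmaps : ∀ j ∈ Finset.range (n + 1),
      (pstep P)^[j] y ∈ Finset.Ico (0 : Int) n := by
    intro j hj
    rw [Finset.mem_range] at hj
    rw [Finset.mem_Ico]
    exact hbnd j (by omega)
  have hn1 : 1 ≤ n := by
    have := hbnd 0 (Nat.zero_le n)
    simp at this; omega
  have hcard : (Finset.Ico (0 : Int) (n : Int)).card < (Finset.range (n + 1)).card := by
    simp
  obtain ⟨j1, hj1, j2, hj2, hne, heq⟩ :=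
    Finset.exists_ne_map_eq_of_card_lt_of_maps_to hcard hmaps
  rw [Finset.mem_range] at hj1 hj2
  apply hpre
  rcases Nat.lt_or_ge j1 j2 with hlt | hge
  · exact cycle_from_dup P x y j1 j2 hlt (by omega) heq hx hbnd
  · exact cycle_from_dup P x y j2 j1 (by omega) (by omega) heq.symm hx hbnd

-- total size of the first len P + 1 layers
theorem sum_layers_le (P : List Int) (x : Int) :
    (∑ k ∈ Finset.range (P.length + 1), ((nxt P)^[k] [x]).length) ≤ P.length * P.length + 1 := by
  rw [Finset.sum_range_succ' (fun k => ((nxt P)^[k] [x]).length) P.length]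
  have h1 : (∑ k ∈ Finset.range P.length, ((nxt P)^[k + 1] [x]).length)
      ≤ ∑ _k ∈ Finset.range P.length, P.length :=
    Finset.sum_le_sum (fun k _ => layer_len P x k)
  simp only [Finset.sum_const, Finset.card_range, smul_eq_mul] at h1
  simp only [Function.iterate_zero, id, List.length_singleton]
  omega

-- ===== VERDICT (by name: the statement is the Claim_ definition above) =====
theorem es4_spec : Claim_equal_es4 := by
  intro P x _ hpre
  unfold Spec_es4 es4 es4_alt
  have h := sim2 P (P.length + 1) [x] [] (P.length * P.length + 2) (P.length + 2)
    (deep_empty P x hpre)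
    (le_trans (sum_layers_le P x) (by omega))
    (by omega)
  simpa using h
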